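-- pv_equiv track=rewrite | github.com/powergama/powergama | powergama/powergama/powergim.py | gamePayoffIsSymmetric
-- ===== SOURCE A (Python) =====
-- def gamePayoffIsSymmetric(values, payoff_vector):
--     '''
--     Returns true if the resulting payoff vector possesses the symmetry property.
--     A payoff vector possesses the symmetry property if players with equal
--     marginal contribution receives the same payoff:
--     v(C \cup i) = v(C \cup j) for all
--     C \in 2^{\Omega} \setminus \{i,j\}, then x_i = x_j.
--     '''
--     import itertools
--     sets = values.keys()
--     element = [i for i in sets if len(i) == 1]
--     for c1, c2 in itertools.combinations(element, 2):
--         results = []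
--         for m in sets:
--             junion = tuple(sorted(set(c1) | set(m)))
--             kunion = tuple(sorted(set(c2) | set(m)))
--             results.append(values[junion] == values[kunion])
--         if all(results) and payoff_vector[c1[0]] != payoff_vector[c2[0]]:
--             return False
--     return True
-- ===== SOURCE B (Python) =====
-- def gamePayoffIsSymmetric(values, payoff_vector):
--     '''Group singleton players by their union-value signature (one .get pass
--     over the keys per singleton), then check payoffs are constant inside each
--     signature group of size >= 2.  Total: missing entries read as None.'''
--     sets = list(values.keys())
--     singles = [k for k in sets if len(k) == 1]
--     if len(singles) < 2:
--         return True
--     groups = {}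
--     for c in singles:
--         sig = tuple(values.get(tuple(sorted(set(c) | set(m)))) for m in sets)
--         groups.setdefault(sig, []).append(c)
--     for members in groups.values():
--         if len(members) >= 2:
--             if len({payoff_vector.get(c[0]) for c in members}) > 1:
--                 return False
--     return True
-- ===== Notes on version B (the rewrite author's own statement) =====
-- stated objective: alternative
-- what changed: A scans all O(p^2) pairs of singleton players and recomputes both union-value signatures per pair; B computes each singleton's signature once with .get lookups, groups singletons by signature in a dict, and checks payoffs are constant inside each group of size >= 2, so B matches A's value (including early False) wherever A returns, and B returns a value (instead of KeyError) where A raises on missing keys.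
import Mathlib
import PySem

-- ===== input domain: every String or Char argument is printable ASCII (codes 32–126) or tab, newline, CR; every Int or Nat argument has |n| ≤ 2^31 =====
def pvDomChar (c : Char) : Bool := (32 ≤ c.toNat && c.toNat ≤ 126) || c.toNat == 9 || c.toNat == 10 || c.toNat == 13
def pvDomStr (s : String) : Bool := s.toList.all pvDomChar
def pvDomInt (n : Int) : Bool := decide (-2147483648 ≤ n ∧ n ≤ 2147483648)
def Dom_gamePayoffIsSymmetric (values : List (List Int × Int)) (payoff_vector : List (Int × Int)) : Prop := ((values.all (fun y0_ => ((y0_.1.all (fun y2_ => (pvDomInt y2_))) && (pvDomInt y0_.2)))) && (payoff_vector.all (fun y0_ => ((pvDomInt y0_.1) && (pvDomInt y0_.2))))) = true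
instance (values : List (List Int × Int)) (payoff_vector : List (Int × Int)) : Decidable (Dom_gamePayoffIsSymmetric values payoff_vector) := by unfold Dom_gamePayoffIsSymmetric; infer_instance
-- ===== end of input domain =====

-- B replaces A's pairwise scan over singletons by one grouping pass: each singleton
-- is keyed by its union-value signature (via total .get lookups) in a dict and
-- payoffs are checked to be constant inside each signature group (objective:
-- alternative algorithm, same cost on typical inputs; B is total where A raises).

-- shared transliteration helpers: tuple(sorted(set(c) | set(m))) and the .get?-signature
def pvUnionKey (c m : List Int) : List Int :=
  PySem.List.sorted (PySem.Set.union (PySem.Set.ofList c) m) (fun x => x) false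

def pvSig (d : PySem.Dict (List Int) Int) (sets : List (List Int)) (c : List Int) :
    List (Option Int) :=
  sets.map (fun m => d.get? (pvUnionKey c m))

-- payoff_vector lookup for c[0] (none = Python's KeyError in A / None from .get in B)
def pvPay (pv : PySem.Dict Int Int) (c : List Int) : Option Int :=
  pv.get? (PySem.List.pyGetD c (0 : Int) 0)

-- ===== PORT A =====
-- itertools.combinations(element, 2), in order
def pvPairs : List (List Int) → List (List Int × List Int)
  | [] => []
  | x :: xs => xs.map (fun y => (x, y)) ++ pvPairs xs

-- the 'for c1, c2 in combinations(...)' loop with its early 'return False'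
def pvALoop (d : PySem.Dict (List Int) Int) (pv : PySem.Dict Int Int)
    (sets : List (List Int)) : List (List Int × List Int) → Bool
  | [] => true
  | (c1, c2) :: rest =>
    let results := sets.map (fun m =>
      d.get? (pvUnionKey c1 m) == d.get? (pvUnionKey c2 m))
    if results.all (fun r => r) && (pvPay pv c1 != pvPay pv c2) then false
    else pvALoop d pv sets rest

def gamePayoffIsSymmetric (values : List (List Int × Int)) (payoff_vector : List (Int × Int)) : Bool :=
  let d := PySem.Dict.ofList values
  let pv := PySem.Dict.ofList payoff_vector
  let sets := d.keys
  let element := sets.filter (fun i => i.length == 1)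
  pvALoop d pv sets (pvPairs element)

-- ===== PORT B =====
-- groups.setdefault(sig, []).append(c) over all singletons
def pvBGroups (d : PySem.Dict (List Int) Int) (sets singles : List (List Int)) :
    PySem.Dict (List (Option Int)) (List (List Int)) :=
  singles.foldl (fun g c => g.modify (pvSig d sets c) [] (· ++ [c])) PySem.Dict.empty

-- the 'for members in groups.values()' loop with its early 'return False'
def pvBCheck (pv : PySem.Dict Int Int) : List (List (List Int)) → Bool
  | [] => true
  | ms :: rest =>
    if 2 ≤ ms.length then
      let payoffs := PySem.Set.ofList (ms.map (fun c => pvPay pv c))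
      if 1 < payoffs.length then false else pvBCheck pv rest
    else pvBCheck pv rest

def gamePayoffIsSymmetric_alt (values : List (List Int × Int)) (payoff_vector : List (Int × Int)) : Bool :=
  let d := PySem.Dict.ofList values
  let pv := PySem.Dict.ofList payoff_vector
  let sets := d.keys
  let singles := sets.filter (fun k => k.length == 1)
  if singles.length < 2 then true
  else pvBCheck pv (pvBGroups d sets singles).values

-- ===== PRECONDITION & SPEC =====
-- pvErr p: Python A would raise KeyError at the pair p (a union key of either member
-- is missing, or the signatures agree and a needed payoff entry is missing)
def pvErr (d : PySem.Dict (List Int) Int) (pv : PySem.Dict Int Int)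
    (sets : List (List Int)) (p : List Int × List Int) : Prop :=
  (∃ m ∈ sets, d.get? (pvUnionKey p.1 m) = none ∨ d.get? (pvUnionKey p.2 m) = none) ∨
  (pvSig d sets p.1 = pvSig d sets p.2 ∧ (pvPay pv p.1 = none ∨ pvPay pv p.2 = none))

-- pvBad p: Python A would return False at the pair p (all keys present, equal
-- signatures, different payoffs)
def pvBad (d : PySem.Dict (List Int) Int) (pv : PySem.Dict Int Int)
    (sets : List (List Int)) (p : List Int × List Int) : Prop :=
  (∀ m ∈ sets, (d.get? (pvUnionKey p.1 m)).isSome = true ∧ (d.get? (pvUnionKey p.2 m)).isSome = true) ∧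
  pvSig d sets p.1 = pvSig d sets p.2 ∧
  (pvPay pv p.1).isSome = true ∧ (pvPay pv p.2).isSome = true ∧ pvPay pv p.1 ≠ pvPay pv p.2

-- Pre_ admits exactly the inputs on which Python A returns normally: either no pair of
-- singletons (taken in combinations order, i.e. lexicographic index order i < j) hits a
-- missing key, or an asymmetric pair (A's early 'return False') comes strictly before
-- the first pair that would hit a missing key; outside Pre_ A raises KeyError while B's
-- .get lookups make it return a value.
def Pre_gamePayoffIsSymmetric (values : List (List Int × Int)) (payoff_vector : List (Int × Int)) : Prop :=
  let d := PySem.Dict.ofList values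
  let pv := PySem.Dict.ofList payoff_vector
  let sets := d.keys
  let singles := sets.filter (fun k => k.length == 1)
  let n := singles.length
  let at_ := fun i => singles.getD i []
  (∀ i ∈ List.range n, ∀ j ∈ List.range n, i < j → ¬ pvErr d pv sets (at_ i, at_ j)) ∨
  (∃ i ∈ List.range n, ∃ j ∈ List.range n, i < j ∧ pvBad d pv sets (at_ i, at_ j) ∧
    ∀ a ∈ List.range n, ∀ b ∈ List.range n, a < b → (a < i ∨ (a = i ∧ b < j)) →
      ¬ pvErr d pv sets (at_ a, at_ b))
instance (values : List (List Int × Int)) (payoff_vector : List (Int × Int)) : Decidable (Pre_gamePayoffIsSymmetric values payoff_vector) := by unfold Pre_gamePayoffIsSymmetric pvErr pvBad; infer_instance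

def pvWitness_gamePayoffIsSymmetric : (List (List Int × Int)) × (List (Int × Int)) :=
  ([([1], 0), ([2], 0), ([1, 2], 0)], [(1, 0), (2, 0)])

def Spec_gamePayoffIsSymmetric (values : List (List Int × Int)) (payoff_vector : List (Int × Int)) (out : Bool) : Prop := out = gamePayoffIsSymmetric_alt values payoff_vector
instance (values : List (List Int × Int)) (payoff_vector : List (Int × Int)) (out : Bool) : Decidable (Spec_gamePayoffIsSymmetric values payoff_vector out) := by unfold Spec_gamePayoffIsSymmetric; infer_instance

-- ===== CLAIM (what is proved, stated in full; the proofs are below) =====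
def Claim_equal_gamePayoffIsSymmetric : Prop := ∀ (values : List (List Int × Int)) (payoff_vector : List (Int × Int)), Dom_gamePayoffIsSymmetric values payoff_vector → Pre_gamePayoffIsSymmetric values payoff_vector → Spec_gamePayoffIsSymmetric values payoff_vector (gamePayoffIsSymmetric values payoff_vector)
-- ===== LEMMAS AND PROOFS =====

-- two distinct members force length ≥ 2
lemma pvTwoMem_one_lt_length {α : Type} (l : List α) (a b : α)
    (ha : a ∈ l) (hb : b ∈ l) (hne : a ≠ b) : 1 < l.length := by
  match l with
  | [] => cases ha
  | [x] =>
    simp only [List.mem_singleton] at ha hb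
    exact absurd (ha.trans hb.symm) hne
  | x :: y :: t => simp

-- a list of length < 2 has at most one member
lemma pvSubsingleton_of_length_lt_two {α : Type} (l : List α) (h : l.length < 2)
    (a b : α) (ha : a ∈ l) (hb : b ∈ l) : a = b := by
  match l with
  | [] => cases ha
  | [x] =>
    simp only [List.mem_singleton] at ha hb
    exact ha.trans hb.symm
  | x :: y :: t => simp at h

-- len(set(xs)) > 1 ↔ xs has two different elements
lemma pvOne_lt_length_ofList_iff {α : Type} [BEq α] [LawfulBEq α] (xs : List α) :
    1 < (PySem.Set.ofList xs).length ↔ ∃ a ∈ xs, ∃ b ∈ xs, a ≠ b := by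
  constructor
  · intro h
    match hs : PySem.Set.ofList xs with
    | [] => rw [hs] at h; simp at h
    | [u] => rw [hs] at h; simp at h
    | u :: v :: t =>
      have hnd := PySem.Set.nodup_ofList xs
      rw [hs] at hnd
      have huv : u ≠ v := by
        intro he; exact (List.nodup_cons.mp hnd).1 (he ▸ List.mem_cons_self ..)
      have hu : u ∈ PySem.Set.ofList xs := by rw [hs]; simp
      have hv : v ∈ PySem.Set.ofList xs := by rw [hs]; simp
      exact ⟨u, (PySem.Set.mem_ofList xs u).mp hu, v, (PySem.Set.mem_ofList xs v).mp hv, huv⟩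
  · rintro ⟨a, ha, b, hb, hne⟩
    exact pvTwoMem_one_lt_length _ a b ((PySem.Set.mem_ofList xs a).mpr ha)
      ((PySem.Set.mem_ofList xs b).mpr hb) hne

-- pairs (combinations of 2) vs. an all-pairs quantifier, for symmetric irreflexive P
lemma pvPairs_forall (P : List Int → List Int → Prop)
    (hsym : ∀ x y, P x y → P y x) (hirr : ∀ x, ¬ P x x) (l : List (List Int)) :
    (∀ p ∈ pvPairs l, ¬ P p.1 p.2) ↔ (∀ x ∈ l, ∀ y ∈ l, ¬ P x y) := by
  induction l with
  | nil => simp [pvPairs]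
  | cons x xs ih =>
    have hsplit : (∀ p ∈ pvPairs (x :: xs), ¬ P p.1 p.2) ↔
        ((∀ y ∈ xs, ¬ P x y) ∧ ∀ p ∈ pvPairs xs, ¬ P p.1 p.2) := by
      simp only [pvPairs, List.mem_append, List.mem_map]
      constructor
      · intro h
        exact ⟨fun y hy => h (x, y) (Or.inl ⟨y, hy, rfl⟩), fun p hp => h p (Or.inr hp)⟩
      · rintro ⟨h1, h2⟩ p hp
        rcases hp with ⟨y, hy, rfl⟩ | hp
        · exact h1 y hy
        · exact h2 p hp
    rw [hsplit, ih]
    constructor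
    · rintro ⟨h1, h2⟩ a ha b hb
      rcases List.mem_cons.mp ha with ha1 | ha'
      · rcases List.mem_cons.mp hb with hb1 | hb'
        · rw [ha1, hb1]; exact hirr x
        · rw [ha1]; exact h1 b hb'
      · rcases List.mem_cons.mp hb with hb1 | hb'
        · rw [hb1]; intro hP; exact h1 a ha' (hsym a x hP)
        · exact h2 a ha' b hb'
    · intro h
      exact ⟨fun y hy => h x (List.mem_cons_self ..) y (List.mem_cons.mpr (Or.inr hy)),
        fun a ha b hb => h a (List.mem_cons.mpr (Or.inr ha)) b (List.mem_cons.mpr (Or.inr hb))⟩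

-- the A-loop returns true iff no listed pair has equal signatures and different payoffs
lemma pvALoop_eq_true_iff (d : PySem.Dict (List Int) Int) (pv : PySem.Dict Int Int)
    (sets : List (List Int)) (l : List (List Int × List Int)) :
    pvALoop d pv sets l = true ↔
      ∀ p ∈ l, ¬ (pvSig d sets p.1 = pvSig d sets p.2 ∧ pvPay pv p.1 ≠ pvPay pv p.2) := by
  induction l with
  | nil => simp [pvALoop]
  | cons p rest ih =>
    obtain ⟨c1, c2⟩ := p
    have hall : ((sets.map (fun m =>
        d.get? (pvUnionKey c1 m) == d.get? (pvUnionKey c2 m))).all (fun r => r)) = true ↔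
        pvSig d sets c1 = pvSig d sets c2 := by
      rw [List.all_map]
      simp only [List.all_eq_true, Function.comp, beq_iff_eq, pvSig]
      exact (List.map_eq_map_iff).symm
    by_cases hs : pvSig d sets c1 = pvSig d sets c2
    · by_cases hp : pvPay pv c1 = pvPay pv c2
      · simp only [pvALoop, hall.mpr hs, Bool.true_and, bne_iff_ne, hp, ne_eq,
          not_true_eq_false, if_false, ih, List.mem_cons]
        constructor
        · intro h q hq
          rcases hq with rfl | hq
          · exact fun hc => hc.2 hp
          · exact h q hq
        · intro h q hq; exact h q (Or.inr hq)
      · have hbne : (pvPay pv c1 != pvPay pv c2) = true := bne_iff_ne.mpr hp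
        simp only [pvALoop, hall.mpr hs, Bool.true_and, hbne, if_true]
        constructor
        · intro h; cases h
        · intro h; exact absurd ⟨hs, hp⟩ (h (c1, c2) (List.mem_cons_self ..))
    · have hfalse : ((sets.map (fun m =>
          d.get? (pvUnionKey c1 m) == d.get? (pvUnionKey c2 m))).all (fun r => r)) = false := by
        cases hx : (sets.map (fun m =>
          d.get? (pvUnionKey c1 m) == d.get? (pvUnionKey c2 m))).all (fun r => r)
        · rfl
        · exact absurd (hall.mp hx) hs
      simp only [pvALoop, hfalse, Bool.false_and, Bool.false_eq_true, if_false,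
        ih, List.mem_cons]
      constructor
      · intro h q hq
        rcases hq with rfl | hq
        · exact fun hc => hs hc.1
        · exact h q hq
      · intro h q hq; exact h q (Or.inr hq)

-- the B-loop returns true iff no listed group of ≥ 2 members has two different payoffs
lemma pvBCheck_eq_true_iff (pv : PySem.Dict Int Int) (L : List (List (List Int))) :
    pvBCheck pv L = true ↔
      ∀ ms ∈ L, ¬ (2 ≤ ms.length ∧
        1 < (PySem.Set.ofList (ms.map (fun c => pvPay pv c))).length) := by
  induction L with
  | nil => simp [pvBCheck]
  | cons ms rest ih =>
    by_cases h2 : 2 ≤ ms.length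
    · by_cases hp : 1 < (PySem.Set.ofList (ms.map (fun c => pvPay pv c))).length
      · simp only [pvBCheck, if_pos h2, if_pos hp, List.mem_cons]
        constructor
        · intro h; cases h
        · intro h; exact absurd ⟨h2, hp⟩ (h ms (Or.inl rfl))
      · simp only [pvBCheck, if_pos h2, if_neg hp, ih, List.mem_cons]
        constructor
        · intro h q hq
          rcases hq with rfl | hq
          · exact fun hc => hp hc.2
          · exact h q hq
        · intro h q hq; exact h q (Or.inr hq)
    · simp only [pvBCheck, if_neg h2, ih, List.mem_cons]
      constructor
      · intro h q hq
        rcases hq with rfl | hq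
        · exact fun hc => h2 hc.1
        · exact h q hq
      · intro h q hq; exact h q (Or.inr hq)

-- the grouping dict's value lists are the signature-fibres of `singles`
lemma pvBGroups_values (d : PySem.Dict (List Int) Int) (sets singles : List (List Int)) :
    (pvBGroups d sets singles).values =
      (PySem.Set.ofList (singles.map (pvSig d sets))).map
        (fun s => singles.filter (fun c => pvSig d sets c == s)) := by
  have hfold : pvBGroups d sets singles =
      (singles.map (fun c => (pvSig d sets c, c))).foldl
        (fun g p => g.modify p.1 [] (· ++ [p.2])) PySem.Dict.empty := by
    rw [List.foldl_map]; rfl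
  have hnd : (pvBGroups d sets singles).keys.Nodup := by
    unfold pvBGroups
    exact PySem.Dict.nodup_keys_foldl_modify_key singles (pvSig d sets) []
      (fun g c => (· ++ [c])) PySem.Dict.empty (by simp [PySem.Dict.keys_empty])
  have hkeys : (pvBGroups d sets singles).keys =
      PySem.Set.ofList (singles.map (pvSig d sets)) := by
    unfold pvBGroups
    rw [PySem.Dict.keys_foldl_modify_key]
    simp [PySem.Dict.keys_empty, PySem.Set.update_nil_left]
  rw [PySem.Dict.values_eq_map_keys _ hnd [], hkeys]
  refine List.map_congr_left ?_
  intro s hs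
  rw [hfold, PySem.Dict.getD_foldl_modify_append, PySem.Dict.getD_empty]
  rw [List.filter_map, List.map_map]
  simp [Function.comp_def]

-- the two loop pipelines agree for ANY dicts and ANY key lists (both Lean ports are
-- total: Python's missing keys are Option `none` values here)
lemma pvMain (d : PySem.Dict (List Int) Int) (pv : PySem.Dict Int Int)
    (sets singles : List (List Int)) :
    pvALoop d pv sets (pvPairs singles) =
      (if singles.length < 2 then true
       else pvBCheck pv (pvBGroups d sets singles).values) := by
  apply Bool.coe_iff_coe.mp
  rw [pvALoop_eq_true_iff]
  rw [pvPairs_forall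
    (fun x y => pvSig d sets x = pvSig d sets y ∧ pvPay pv x ≠ pvPay pv y)
    (fun x y h => ⟨h.1.symm, fun he => h.2 he.symm⟩)
    (fun x h => h.2 rfl)]
  have hQiff : (∀ x ∈ singles, ∀ y ∈ singles,
      ¬ (pvSig d sets x = pvSig d sets y ∧ pvPay pv x ≠ pvPay pv y)) ↔
      (∀ x ∈ singles, ∀ y ∈ singles, pvSig d sets x = pvSig d sets y →
        pvPay pv x = pvPay pv y) := by
    constructor
    · intro h x hx y hy hs
      by_contra hp
      exact h x hx y hy ⟨hs, hp⟩
    · intro h x hx y hy hc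
      exact hc.2 (h x hx y hy hc.1)
  rw [hQiff]
  by_cases hlen : singles.length < 2
  · rw [if_pos hlen]
    simp only [iff_true]
    intro x hx y hy _
    rw [pvSubsingleton_of_length_lt_two singles hlen x y hx hy]
  · rw [if_neg hlen]
    rw [pvBCheck_eq_true_iff, pvBGroups_values]
    constructor
    · -- payoffs respect signatures → every group is payoff-constant
      intro h ms hms
      rw [List.mem_map] at hms
      obtain ⟨s, _, rfl⟩ := hms
      rintro ⟨-, hone⟩
      rw [pvOne_lt_length_ofList_iff] at hone
      obtain ⟨u, hu, v, hv, huv⟩ := hone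
      rw [List.mem_map] at hu hv
      obtain ⟨a, ha, rfl⟩ := hu
      obtain ⟨b, hb, rfl⟩ := hv
      have ha' := List.mem_filter.mp ha
      have hb' := List.mem_filter.mp hb
      exact huv (h a ha'.1 b hb'.1
        ((beq_iff_eq.mp ha'.2).trans (beq_iff_eq.mp hb'.2).symm))
    · -- every group payoff-constant → payoffs respect signatures
      intro h x hx y hy hs
      by_contra hp
      have hxy : x ≠ y := fun he => hp (he ▸ rfl)
      have hmem : pvSig d sets x ∈ PySem.Set.ofList (singles.map (pvSig d sets)) :=
        (PySem.Set.mem_ofList _ _).mpr (List.mem_map.mpr ⟨x, hx, rfl⟩)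
      refine h _ (List.mem_map.mpr ⟨pvSig d sets x, hmem, rfl⟩) ⟨?_, ?_⟩
      · have hxf : x ∈ singles.filter (fun c => pvSig d sets c == pvSig d sets x) :=
          List.mem_filter.mpr ⟨hx, beq_iff_eq.mpr rfl⟩
        have hyf : y ∈ singles.filter (fun c => pvSig d sets c == pvSig d sets x) :=
          List.mem_filter.mpr ⟨hy, beq_iff_eq.mpr hs.symm⟩
        exact pvTwoMem_one_lt_length _ x y hxf hyf hxy
      · rw [pvOne_lt_length_ofList_iff]
        refine ⟨pvPay pv x, ?_, pvPay pv y, ?_, hp⟩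
        · exact List.mem_map.mpr ⟨x, List.mem_filter.mpr ⟨hx, beq_iff_eq.mpr rfl⟩, rfl⟩
        · exact List.mem_map.mpr ⟨y, List.mem_filter.mpr ⟨hy, beq_iff_eq.mpr hs.symm⟩, rfl⟩

-- ===== VERDICT (by name: the statement is the Claim_ definition above) =====
theorem gamePayoffIsSymmetric_spec : Claim_equal_gamePayoffIsSymmetric := by
  intro values payoff_vector _ _
  unfold Spec_gamePayoffIsSymmetric gamePayoffIsSymmetric gamePayoffIsSymmetric_alt
  exact pvMain _ _ _ _
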